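-- pv_equiv track=rewrite | github.com/gcpreston/aoc-2015 | day13/day13.py | calc_change
-- ===== SOURCE A (Python) =====
-- from typing import Dict, Tuple
--
-- def calc_change(arrangement: Tuple[str],
--                 deltas: Dict[str, Dict[str, int]]) -> int:
--     """
--     Calculates the total change in happiness for a given seating arrangement.
--     """
--     change = 0
--     size = len(arrangement)
--
--     for i in range(size):
--         change += deltas[arrangement[i]][arrangement[(i - 1) % size]]
--         change += deltas[arrangement[i]][arrangement[(i + 1) % size]]
--
--     return change
-- ===== SOURCE B (Python) =====
-- def calc_change(arrangement, deltas):
--     """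
--     Calculates the total change in happiness for a given seating arrangement.
--
--     Two stages: first build a frequency table of the directed successor edges
--     of the circle (predecessor, person); then sum, over each DISTINCT edge,
--     its multiplicity times both directed happiness deltas of that edge.
--     """
--     counts = {}
--     prev = arrangement[-1] if arrangement else None
--     for person in arrangement:
--         edge = (prev, person)
--         counts[edge] = counts.get(edge, 0) + 1
--         prev = person
--     total = 0
--     for (a, b), c in counts.items():
--         total += c * (deltas[a][b] + deltas[b][a])
--     return total
-- ===== Notes on version B (the rewrite author's own statement) =====
-- stated objective: alternative
-- what changed: B replaces A's per-person loop with modular neighbor indexing by a two-stage algorithm: it first builds a hash-map multiplicity table of the circle's directed successor edges, then sums count * (both directed deltas) over each distinct edge, so the deltas table is consulted once per distinct edge instead of twice per seat.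
import Mathlib
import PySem

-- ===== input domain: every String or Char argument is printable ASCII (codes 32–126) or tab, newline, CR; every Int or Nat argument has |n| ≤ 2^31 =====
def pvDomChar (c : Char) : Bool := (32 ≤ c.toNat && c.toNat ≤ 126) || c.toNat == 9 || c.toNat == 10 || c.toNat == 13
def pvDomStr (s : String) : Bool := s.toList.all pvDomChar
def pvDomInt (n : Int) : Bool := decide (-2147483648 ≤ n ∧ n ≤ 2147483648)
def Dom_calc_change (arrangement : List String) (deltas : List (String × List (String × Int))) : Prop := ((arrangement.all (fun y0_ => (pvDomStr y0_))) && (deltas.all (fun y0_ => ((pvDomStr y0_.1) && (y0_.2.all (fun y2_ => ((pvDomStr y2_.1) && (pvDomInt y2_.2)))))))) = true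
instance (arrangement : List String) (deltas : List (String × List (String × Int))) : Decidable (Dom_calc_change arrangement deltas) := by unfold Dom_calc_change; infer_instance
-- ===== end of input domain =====

-- B is a two-stage algorithm: it builds a multiplicity table (dict) of the circle's directed
-- successor edges, then sums count * (both directed deltas) over each DISTINCT edge, instead of
-- A's per-person loop with (i±1) % size neighbor lookups.

-- Python 'deltas[x][y]' as an association-list lookup (first match = dict semantics); none = KeyError.
def lookup2? (deltas : List (String × List (String × Int))) (x y : String) : Option Int :=
  match deltas.find? (fun p => p.1 == x) with
  | none => none
  | some p => (p.2.find? (fun q => q.1 == y)).map (fun q => q.2)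

-- total lookup used by both ports; the default 0 is never reached under Pre_calc_change
def dget2 (deltas : List (String × List (String × Int))) (x y : String) : Int :=
  (lookup2? deltas x y).getD 0

-- ===== PORT A =====
-- 'size = len(arrangement)' is inlined as '(arrangement.length : Int)'
def calc_change (arrangement : List String) (deltas : List (String × List (String × Int))) : Int :=
  (PySem.List.pyRange 0 (arrangement.length : Int) 1).foldl
    (fun change i =>
      change
        + dget2 deltas (PySem.List.pyGetD arrangement i "")
            (PySem.List.pyGetD arrangement (PySem.Int.mod (i - 1) (arrangement.length : Int)) "")
        + dget2 deltas (PySem.List.pyGetD arrangement i "")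
            (PySem.List.pyGetD arrangement (PySem.Int.mod (i + 1) (arrangement.length : Int)) ""))
    0

-- ===== PORT B =====
-- 'prev = arrangement[-1] if arrangement else None': the placeholder "" is never read when
-- arrangement is empty (the loop body never runs), matching Python's unused None.
def calc_change_alt (arrangement : List String) (deltas : List (String × List (String × Int))) : Int :=
  let prev0 : String := PySem.List.pyGetD arrangement (-1) ""
  let counts :=
    (arrangement.foldl
      (fun st person =>
        (st.1.insert (st.2, person) (st.1.getD (st.2, person) 0 + 1), person))
      ((PySem.Dict.empty : PySem.Dict (String × String) Int), prev0)).1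
  counts.items.foldl
    (fun total p =>
      total + p.2 * (dget2 deltas p.1.1 p.1.2 + dget2 deltas p.1.2 p.1.1)) 0

-- ===== PRECONDITION & SPEC =====
-- Pre_ excludes exactly the inputs on which Python A raises KeyError: some circularly adjacent
-- pair of arrangement misses a (directed) entry in deltas.
def Pre_calc_change (arrangement : List String) (deltas : List (String × List (String × Int))) : Prop :=
  ((arrangement.zip (arrangement.drop 1 ++ arrangement.take 1)).all
    (fun p => (lookup2? deltas p.1 p.2).isSome && (lookup2? deltas p.2 p.1).isSome)) = true
instance (arrangement : List String) (deltas : List (String × List (String × Int))) : Decidable (Pre_calc_change arrangement deltas) := by unfold Pre_calc_change; infer_instance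

def pvWitness_calc_change : List String × (List (String × List (String × Int))) :=
  (["a", "b"], [("a", [("b", 3)]), ("b", [("a", -2)])])

def Spec_calc_change (arrangement : List String) (deltas : List (String × List (String × Int))) (out : Int) : Prop := out = calc_change_alt arrangement deltas
instance (arrangement : List String) (deltas : List (String × List (String × Int))) (out : Int) : Decidable (Spec_calc_change arrangement deltas out) := by unfold Spec_calc_change; infer_instance

-- ===== CLAIM (what is proved, stated in full; the proofs are below) =====
def Claim_equal_calc_change : Prop := ∀ (arrangement : List String) (deltas : List (String × List (String × Int))), Dom_calc_change arrangement deltas → Pre_calc_change arrangement deltas → Spec_calc_change arrangement deltas (calc_change arrangement deltas)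

-- ===== LEMMAS AND PROOFS =====

-- the directed successor edges (predecessor, person) of the circle, as B's loop generates them
def edgeList (prev : String) : List String → List (String × String)
  | [] => []
  | x :: t => (prev, x) :: edgeList x t

-- B's counting loop (with its carried prev) is the counter-building fold over edgeList
theorem fold_fst_eq (l : List String) :
    ∀ (d : PySem.Dict (String × String) Int) (p : String),
    (l.foldl
      (fun st person =>
        (st.1.insert (st.2, person) (st.1.getD (st.2, person) 0 + 1), person))
      (d, p)).1
    = (edgeList p l).foldl (fun d e => d.insert e (d.getD e 0 + 1)) d := by
  induction l with
  | nil => intro d p; rfl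
  | cons x t ih => intro d p; simp only [List.foldl, edgeList]; exact ih _ _

theorem edgeList_eq_zip (p : String) (l : List String) :
    edgeList p l = (p :: l.dropLast).zip l := by
  induction l generalizing p with
  | nil => rfl
  | cons x t ih =>
    cases t with
    | nil => rfl
    | cons y s => simp only [edgeList, List.dropLast_cons₂, List.zip_cons_cons] at *; rw [ih]

-- (k - 1) % n in Python = (k + (n-1)) % n in Nat, for 0 < n
theorem mod_pred_eq (n k : Nat) (hn : 0 < n) :
    PySem.Int.mod ((k:Int) - 1) (n:Int) = (((k + (n-1)) % n : Nat) : Int) := by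
  rw [PySem.Int.mod_eq_emod_of_pos (by exact_mod_cast hn)]
  have h : (k:Int) - 1 = ((k + (n-1) : Nat) : Int) - 1 * (n:Int) := by push_cast; omega
  rw [h]
  have := Int.sub_mul_emod_self_left (a := ((k + (n-1) : Nat) : Int)) (b := 1) (c := (n:Int))
  simp at this ⊢

-- (k + 1) % n in Python = (k + 1) % n in Nat
theorem mod_succ_eq (n k : Nat) (hn : 0 < n) :
    PySem.Int.mod ((k:Int) + 1) (n:Int) = (((k + 1) % n : Nat) : Int) := by
  rw [PySem.Int.mod_eq_emod_of_pos (by exact_mod_cast hn)]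
  have h : (k:Int) + 1 = ((k + 1 : Nat) : Int) := by push_cast; ring
  rw [h]
  simp

-- ((List.range n).map f).sum is the Finset.range sum, definitionally
theorem sum_map_range (n : Nat) (f : Nat → Int) :
    ((List.range n).map f).sum = ∑ i ∈ Finset.range n, f i := rfl

-- A as a sum over Finset.range
theorem calc_change_as_sum (arrangement : List String) (deltas : List (String × List (String × Int)))
    (hn : 0 < arrangement.length) :
    calc_change arrangement deltas =
      ∑ k ∈ Finset.range arrangement.length,
        (dget2 deltas (arrangement.getD k "") (arrangement.getD ((k + (arrangement.length - 1)) % arrangement.length) "")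
          + dget2 deltas (arrangement.getD k "") (arrangement.getD ((k + 1) % arrangement.length) "")) := by
  unfold calc_change
  rw [PySem.List.foldl_congr_mem (f := fun change i =>
    change + dget2 deltas (PySem.List.pyGetD arrangement i "")
        (PySem.List.pyGetD arrangement (PySem.Int.mod (i - 1) (arrangement.length : Int)) "")
      + dget2 deltas (PySem.List.pyGetD arrangement i "")
        (PySem.List.pyGetD arrangement (PySem.Int.mod (i + 1) (arrangement.length : Int)) ""))
    (g := fun change i =>
    change + (dget2 deltas (PySem.List.pyGetD arrangement i "")
        (PySem.List.pyGetD arrangement (PySem.Int.mod (i - 1) (arrangement.length : Int)) "")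
      + dget2 deltas (PySem.List.pyGetD arrangement i "")
        (PySem.List.pyGetD arrangement (PySem.Int.mod (i + 1) (arrangement.length : Int)) "")))
    (l := PySem.List.pyRange 0 (arrangement.length : Int) 1) (init := (0:Int))
    (by intro acc x _; ring)]
  rw [PySem.List.foldl_add]
  rw [PySem.List.pyRange_one, List.map_map]
  simp only [Int.sub_zero, Int.toNat_natCast]
  rw [sum_map_range, zero_add]
  apply Finset.sum_congr rfl
  intro k hk
  have hklt : k < arrangement.length := Finset.mem_range.mp hk
  simp only [Function.comp, zero_add]
  rw [mod_pred_eq _ _ hn, mod_succ_eq _ _ hn]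
  simp only [PySem.List.pyGetD_natCast, List.getD]

-- the edge list, indexed: edge k is (a_{(k+(n-1)) % n}, a_k)
theorem edgeList_eq_map_range (arrangement : List String) (hn : 0 < arrangement.length) :
    edgeList (arrangement.getD (arrangement.length - 1) "") arrangement =
      (List.range arrangement.length).map
        (fun k => (arrangement.getD ((k + (arrangement.length - 1)) % arrangement.length) "",
                   arrangement.getD k "")) := by
  rw [edgeList_eq_zip]
  apply List.ext_getElem
  · simp [List.length_zip]; omega
  · intro k h1 h2
    have hk : k < arrangement.length := by
      simp only [List.length_zip, List.length_cons, List.length_dropLast] at h1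
      omega
    rw [List.getElem_zip, List.getElem_map, List.getElem_range]
    refine Prod.ext ?_ ?_
    · show (arrangement.getD (arrangement.length - 1) "" :: arrangement.dropLast)[k]'(by simp; omega)
        = arrangement.getD ((k + (arrangement.length - 1)) % arrangement.length) ""
      rcases Nat.eq_zero_or_pos k with hk0 | hkpos
      · subst hk0
        simp only [List.getElem_cons_zero]
        congr 1
        rw [Nat.zero_add, Nat.mod_eq_of_lt (by omega)]
      · obtain ⟨j, rfl⟩ : ∃ j, k = j + 1 := ⟨k - 1, by omega⟩
        rw [List.getElem_cons_succ, List.getElem_dropLast]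
        have hmod : (j + 1 + (arrangement.length - 1)) % arrangement.length = j := by
          have h : j + 1 + (arrangement.length - 1) = j + arrangement.length := by omega
          rw [h, Nat.add_mod_right, Nat.mod_eq_of_lt (by omega)]
        rw [hmod]
        exact (List.getD_eq_getElem _ _ (by omega)).symm
    · exact (List.getD_eq_getElem _ _ hk).symm

-- the same count under the type's own BEq and under the DecidableEq-derived BEq
theorem count_beq_eq_count_deq {α : Type} [DecidableEq α] [inst : BEq α] [LawfulBEq α]
    (E : List α) (x : α) :
    @List.count α inst x E = @List.count α instBEqOfDecidableEq x E := by
  induction E with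
  | nil => rfl
  | cons a t ih => simp [List.count_cons, ih]

-- weighted sum over the counter's distinct keys = plain sum over the list
theorem counter_items_sum {α : Type} [DecidableEq α] [BEq α] [LawfulBEq α]
    (E : List α) (f : α → Int) :
    ((PySem.Set.ofList E).map (fun k => ((E.count k : Int)) * f k)).sum = (E.map f).sum := by
  have hnd : (PySem.Set.ofList E).Nodup := PySem.Set.nodup_ofList E
  have hfin : (PySem.Set.ofList E).toFinset = E.toFinset := by
    apply Finset.ext
    intro x
    simp [List.mem_toFinset, PySem.Set.mem_ofList]
  rw [← List.sum_toFinset _ hnd, hfin, Finset.sum_list_map_count]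
  apply Finset.sum_congr rfl
  intro x _
  rw [nsmul_eq_mul, count_beq_eq_count_deq E x]

-- B as a plain sum over the edge list
theorem calc_change_alt_as_sum (arrangement : List String) (deltas : List (String × List (String × Int))) :
    calc_change_alt arrangement deltas =
      ((edgeList (PySem.List.pyGetD arrangement (-1) "") arrangement).map
        (fun e => dget2 deltas e.1 e.2 + dget2 deltas e.2 e.1)).sum := by
  unfold calc_change_alt
  simp only []
  rw [fold_fst_eq, PySem.Dict.foldl_insert_getD_add_one_eq_counter, PySem.List.foldl_add,
    PySem.Dict.items_counter, List.map_map, zero_add]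
  set E := edgeList (PySem.List.pyGetD arrangement (-1) "") arrangement
  have := counter_items_sum E (fun e => dget2 deltas e.1 e.2 + dget2 deltas e.2 e.1)
  rw [← this]
  rfl

-- the circular reindexing: summing f(person, predecessor) equals summing f(successor, person)
theorem sum_pred_reindex (n : Nat) (hn : 0 < n) (f : Nat → Nat → Int) :
    (∑ k ∈ Finset.range n, f k ((k + (n-1)) % n)) =
    (∑ k ∈ Finset.range n, f ((k + 1) % n) k) := by
  apply Finset.sum_nbij' (i := fun k => (k + (n-1)) % n) (j := fun k => (k + 1) % n)
  · intro a ha; exact Finset.mem_range.mpr (Nat.mod_lt _ hn)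
  · intro a ha; exact Finset.mem_range.mpr (Nat.mod_lt _ hn)
  · intro a ha
    have halt : a < n := Finset.mem_range.mp ha
    calc ((a + (n-1)) % n + 1) % n = ((a + (n-1)) + 1) % n := Nat.mod_add_mod _ _ _
    _ = (a + n) % n := by congr 1; omega
    _ = a % n := Nat.add_mod_right a n
    _ = a := Nat.mod_eq_of_lt halt
  · intro a ha
    have halt : a < n := Finset.mem_range.mp ha
    calc ((a + 1) % n + (n-1)) % n = ((a + 1) + (n-1)) % n := Nat.mod_add_mod _ _ _
    _ = (a + n) % n := by congr 1; omega
    _ = a % n := Nat.add_mod_right a n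
    _ = a := Nat.mod_eq_of_lt halt
  · intro a ha
    have halt : a < n := Finset.mem_range.mp ha
    have h : ((a + (n-1)) % n + 1) % n = a := by
      calc ((a + (n-1)) % n + 1) % n = ((a + (n-1)) + 1) % n := Nat.mod_add_mod _ _ _
      _ = (a + n) % n := by congr 1; omega
      _ = a % n := Nat.add_mod_right a n
      _ = a := Nat.mod_eq_of_lt halt
    rw [h]

-- arrangement[-1] = last element, for a nonempty list
theorem pyGetD_neg_one (arrangement : List String) (hn : 0 < arrangement.length) :
    PySem.List.pyGetD arrangement (-1) "" = arrangement.getD (arrangement.length - 1) "" := by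
  unfold PySem.List.pyGetD PySem.List.pyGet? PySem.List.pyIdx?
  split
  · omega
  · split
    · simp [List.getD_eq_getElem?_getD]
    · omega

theorem calc_change_eq (arrangement : List String) (deltas : List (String × List (String × Int))) :
    calc_change arrangement deltas = calc_change_alt arrangement deltas := by
  rcases Nat.eq_zero_or_pos arrangement.length with h0 | hn
  · have h : arrangement = [] := List.eq_nil_of_length_eq_zero h0
    subst h
    rfl
  · rw [calc_change_as_sum _ _ hn, calc_change_alt_as_sum, pyGetD_neg_one _ hn,
      edgeList_eq_map_range _ hn, List.map_map, sum_map_range]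
    simp only [Function.comp]
    rw [Finset.sum_add_distrib, Finset.sum_add_distrib]
    have h := sum_pred_reindex arrangement.length hn
      (fun i j => dget2 deltas (arrangement.getD j "") (arrangement.getD i ""))
    rw [← h]
    ring

-- ===== VERDICT (by name: the statement is the Claim_ definition above) =====
theorem calc_change_spec : Claim_equal_calc_change := by
  intro arrangement deltas _ _
  unfold Spec_calc_change
  exact calc_change_eq arrangement deltas
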